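-- pv_equiv track=rewrite | github.com/bashbash96/InterviewPreparation | LeetCode/Facebook/Medium/1249. Minimum Remove to Make Valid Parentheses.py | get_indexes_to_remove
-- ===== SOURCE A (Python) =====
-- def get_indexes_to_remove(s):
--     stack = []
--     res = set()
--
--     for i, c in enumerate(s):
--         if c == '(':
--             stack.append(i)
--         elif c == ')':
--             if not stack:
--                 res.add(i)
--             else:
--                 stack.pop()
--
--     return res.union(set(stack))
-- ===== SOURCE B (Python) =====
-- def get_indexes_to_remove(s):
--     # Two counter passes instead of an index stack: the forward pass marks
--     # unmatched closing parens, the backward pass marks unmatched opening parens.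
--     remove = set()
--     open_count = 0
--     for i, c in enumerate(s):
--         if c == '(':
--             open_count += 1
--         elif c == ')':
--             if open_count == 0:
--                 remove.add(i)
--             else:
--                 open_count -= 1
--     close_count = 0
--     unmatched_open = []
--     for i, c in reversed(list(enumerate(s))):
--         if c == ')':
--             close_count += 1
--         elif c == '(':
--             if close_count == 0:
--                 unmatched_open.append(i)
--             else:
--                 close_count -= 1
--     for i in reversed(unmatched_open):
--         remove.add(i)
--     return remove
-- ===== Notes on version B (the rewrite author's own statement) =====
-- stated objective: idiomatic
-- what changed: Replaces the index stack with two integer-counter passes: a forward pass marks the indices of unmatched closing parens and a backward pass marks those of unmatched opening parens, so no stack is maintained.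
import Mathlib
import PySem

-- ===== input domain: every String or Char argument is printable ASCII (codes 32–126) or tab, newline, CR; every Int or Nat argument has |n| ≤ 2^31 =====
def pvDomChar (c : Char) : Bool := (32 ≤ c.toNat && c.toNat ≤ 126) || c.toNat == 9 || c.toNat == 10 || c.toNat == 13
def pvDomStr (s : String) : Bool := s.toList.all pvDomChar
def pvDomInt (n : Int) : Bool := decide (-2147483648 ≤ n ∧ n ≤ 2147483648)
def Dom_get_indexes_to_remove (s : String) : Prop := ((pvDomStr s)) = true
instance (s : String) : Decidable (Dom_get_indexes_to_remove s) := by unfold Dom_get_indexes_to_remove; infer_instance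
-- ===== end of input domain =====

-- B replaces A's index stack with two integer-counter passes (forward for unmatched closing parens, backward for unmatched opening parens): no stack, just counters.

-- ===== PORT A =====
def get_indexes_to_remove (s : String) : List Int :=
  let r := (PySem.List.enumerate s.toList).foldl
    (fun (st : List Int × PySem.Set Int) ic =>
      if ic.2 = '(' then (st.1 ++ [ic.1], st.2)
      else if ic.2 = ')' then
        if st.1 = [] then (st.1, PySem.Set.add st.2 ic.1)
        else (st.1.dropLast, st.2)
      else st)
    ([], PySem.Set.empty)
  PySem.Set.union r.2 (PySem.Set.ofList r.1)

-- ===== PORT B =====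
def get_indexes_to_remove_alt (s : String) : List Int :=
  let p1 := (PySem.List.enumerate s.toList).foldl
    (fun (st : Int × PySem.Set Int) ic =>
      if ic.2 = '(' then (st.1 + 1, st.2)
      else if ic.2 = ')' then
        if st.1 = 0 then (st.1, PySem.Set.add st.2 ic.1)
        else (st.1 - 1, st.2)
      else st)
    (0, PySem.Set.empty)
  let p2 := ((PySem.List.enumerate s.toList).reverse).foldl
    (fun (st : Int × List Int) ic =>
      if ic.2 = ')' then (st.1 + 1, st.2)
      else if ic.2 = '(' then
        if st.1 = 0 then (st.1, st.2 ++ [ic.1])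
        else (st.1 - 1, st.2)
      else st)
    (0, ([] : List Int))
  (p2.2.reverse).foldl (fun r i => PySem.Set.add r i) p1.2

-- ===== PRECONDITION & SPEC =====
def Spec_get_indexes_to_remove (s : String) (out : List Int) : Prop := out = get_indexes_to_remove_alt s
instance (s : String) (out : List Int) : Decidable (Spec_get_indexes_to_remove s out) := by unfold Spec_get_indexes_to_remove; infer_instance

-- ===== CLAIM (what is proved, stated in full; the proofs are below) =====
def Claim_equal_get_indexes_to_remove : Prop := ∀ (s : String), Dom_get_indexes_to_remove s → Spec_get_indexes_to_remove s (get_indexes_to_remove s)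

-- ===== LEMMAS AND PROOFS =====

-- A's loop, as a structural recursion: stack (bottom-first, as Python's list) and mark set.
def pvFA : List (Int × Char) → List Int → PySem.Set Int → List Int × PySem.Set Int
  | [], st, r => (st, r)
  | ic :: t, st, r =>
    if ic.2 = '(' then pvFA t (st ++ [ic.1]) r
    else if ic.2 = ')' then
      if st = [] then pvFA t st (PySem.Set.add r ic.1)
      else pvFA t st.dropLast r
    else pvFA t st r

-- the stack component alone
def pvStk : List (Int × Char) → List Int → List Int
  | [], st => st
  | ic :: t, st =>
    if ic.2 = '(' then pvStk t (st ++ [ic.1])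
    else if ic.2 = ')' then
      if st = [] then pvStk t st
      else pvStk t st.dropLast
    else pvStk t st

-- B's forward pass
def pvFB1 : List (Int × Char) → Int → PySem.Set Int → Int × PySem.Set Int
  | [], c, r => (c, r)
  | ic :: t, c, r =>
    if ic.2 = '(' then pvFB1 t (c + 1) r
    else if ic.2 = ')' then
      if c = 0 then pvFB1 t c (PySem.Set.add r ic.1)
      else pvFB1 t (c - 1) r
    else pvFB1 t c r

-- B's backward pass, written as a foldr-style recursion (rightmost element processed first)
def pvBR : List (Int × Char) → Int × List Int
  | [] => (0, [])
  | ic :: t =>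
    let st := pvBR t
    if ic.2 = ')' then (st.1 + 1, st.2)
    else if ic.2 = '(' then
      if st.1 = 0 then (st.1, st.2 ++ [ic.1])
      else (st.1 - 1, st.2)
    else st

-- number of unmatched closing parens (from an empty stack)
def pvD : List (Int × Char) → Nat
  | [] => 0
  | ic :: t => if ic.2 = '(' then pvD t - 1 else if ic.2 = ')' then pvD t + 1 else pvD t

theorem foldlA_eq (e : List (Int × Char)) : ∀ st r,
    e.foldl (fun (st : List Int × PySem.Set Int) ic =>
      if ic.2 = '(' then (st.1 ++ [ic.1], st.2)
      else if ic.2 = ')' then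
        if st.1 = [] then (st.1, PySem.Set.add st.2 ic.1)
        else (st.1.dropLast, st.2)
      else st) (st, r) = pvFA e st r := by
  induction e with
  | nil => intro st r; simp [pvFA]
  | cons ic t ih =>
    intro st r
    simp only [List.foldl_cons]
    by_cases h1 : ic.2 = '('
    · simp [pvFA, h1, ih]
    · by_cases h2 : ic.2 = ')'
      · by_cases h3 : st = [] <;> simp [pvFA, h1, h2, h3, ih]
      · simp [pvFA, h1, h2, ih]

theorem foldlB1_eq (e : List (Int × Char)) : ∀ c r,
    e.foldl (fun (st : Int × PySem.Set Int) ic =>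
      if ic.2 = '(' then (st.1 + 1, st.2)
      else if ic.2 = ')' then
        if st.1 = 0 then (st.1, PySem.Set.add st.2 ic.1)
        else (st.1 - 1, st.2)
      else st) (c, r) = pvFB1 e c r := by
  induction e with
  | nil => intro c r; simp [pvFB1]
  | cons ic t ih =>
    intro c r
    simp only [List.foldl_cons]
    by_cases h1 : ic.2 = '('
    · simp [pvFB1, h1, ih]
    · by_cases h2 : ic.2 = ')'
      · by_cases h3 : c = 0 <;> simp [pvFB1, h1, h2, h3, ih]
      · simp [pvFB1, h1, h2, ih]

theorem foldlB2_eq (e : List (Int × Char)) :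
    e.reverse.foldl (fun (st : Int × List Int) ic =>
      if ic.2 = ')' then (st.1 + 1, st.2)
      else if ic.2 = '(' then
        if st.1 = 0 then (st.1, st.2 ++ [ic.1])
        else (st.1 - 1, st.2)
      else st) (0, ([] : List Int)) = pvBR e := by
  rw [List.foldl_reverse]
  induction e with
  | nil => simp [pvBR]
  | cons ic t ih =>
    simp only [List.foldr_cons, ih]
    rfl

theorem fst_pvFA (e : List (Int × Char)) : ∀ st r, (pvFA e st r).1 = pvStk e st := by
  induction e with
  | nil => intro st r; simp [pvFA, pvStk]
  | cons ic t ih =>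
    intro st r
    by_cases h1 : ic.2 = '('
    · simp [pvFA, pvStk, h1, ih]
    · by_cases h2 : ic.2 = ')'
      · by_cases h3 : st = [] <;> simp [pvFA, pvStk, h1, h2, h3, ih]
      · simp [pvFA, pvStk, h1, h2, ih]

-- stack decomposition: an initial stack only absorbs (up to its size) the unmatched closers of e
theorem pvStk_decomp (e : List (Int × Char)) : ∀ st : List Int,
    pvStk e st = st.take (st.length - min st.length (pvD e)) ++ pvStk e [] := by
  induction e with
  | nil => intro st; simp [pvStk, pvD]
  | cons ic t ih =>
    intro st
    by_cases h1 : ic.2 = '('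
    · simp only [pvStk, pvD, h1, if_pos, List.nil_append]
      rw [ih (st ++ [ic.1]), ih [ic.1]]
      rcases Nat.eq_zero_or_pos (pvD t) with hd | hd
      · simp only [hd, Nat.min_zero, Nat.sub_zero, List.length_append, List.length_cons,
          List.length_nil, List.take_of_length_le (le_refl _), Nat.zero_add]
        rw [List.take_of_length_le (by simp)]
        simp
      · have hle : st.length + 1 - min (st.length + 1) (pvD t) ≤ st.length := by omega
        rw [List.take_append_of_le_length (by simpa using hle)]
        have h0 : 1 - min 1 (pvD t) = 0 := by omega
        simp only [List.length_append, List.length_cons, List.length_nil, h0, List.take_zero,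
          List.nil_append]
        congr 2
        omega
    · by_cases h2 : ic.2 = ')'
      · by_cases h3 : st = []
        · simp [pvStk, pvD, h1, h2, h3]
        · have e1 : pvStk (ic :: t) st = pvStk t st.dropLast := by simp [pvStk, h1, h2, h3]
          have e2 : pvStk (ic :: t) [] = pvStk t [] := by simp [pvStk, h1, h2]
          have e3 : pvD (ic :: t) = pvD t + 1 := by simp [pvD, h1, h2]
          rw [e1, e2, e3, ih st.dropLast]
          have hpos : 0 < st.length := List.length_pos_iff.mpr h3
          have hdl : st.dropLast.length = st.length - 1 := by simp
          have hamt : st.dropLast.length - min st.dropLast.length (pvD t)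
              = st.length - min st.length (pvD t + 1) := by
            omega
          rw [hamt, List.dropLast_eq_take, List.take_take]
          congr 2
          omega
      · simp only [pvStk, pvD, h1, h2, ite_false]
        exact ih st

-- the backward pass computes the unmatched-closer count and the leftover stack, reversed
theorem pvBR_eq (e : List (Int × Char)) : pvBR e = ((pvD e : Int), (pvStk e []).reverse) := by
  induction e with
  | nil => simp [pvBR, pvD, pvStk]
  | cons ic t ih =>
    by_cases h2 : ic.2 = ')'
    · have h1 : ¬ ic.2 = '(' := by rw [h2]; decide
      have e1 : pvStk (ic :: t) [] = pvStk t [] := by simp [pvStk, h1, h2]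
      simp [pvBR, pvD, h1, h2, ih, e1]
    · by_cases h1 : ic.2 = '('
      · have e1 : pvStk (ic :: t) [] = pvStk t [ic.1] := by simp [pvStk, h1]
        rcases Nat.eq_zero_or_pos (pvD t) with hd | hd
        · have e2 : pvStk t [ic.1] = ic.1 :: pvStk t [] := by
            rw [pvStk_decomp t [ic.1]]; simp [hd]
          simp [pvBR, pvD, h1, h2, ih, e1, e2, hd]
        · have e2 : pvStk t [ic.1] = pvStk t [] := by
            rw [pvStk_decomp t [ic.1]]
            have h0 : 1 - min 1 (pvD t) = 0 := by omega
            simp [h0]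
          have hne : ((pvD t : Nat) : Int) ≠ 0 := by omega
          have hc : ((pvD t : Nat) : Int) - 1 = ((pvD t - 1 : Nat) : Int) := by omega
          simp [pvBR, pvD, h1, h2, ih, e1, e2, hne, hc]
          omega
      · simp [pvBR, pvD, h1, h2, ih, pvStk]

-- B's forward pass tracks A's stack length and builds the same mark set
theorem pvFB1_eq (e : List (Int × Char)) : ∀ (st : List Int) r,
    pvFB1 e (st.length : Int) r = (((pvStk e st).length : Int), (pvFA e st r).2) := by
  induction e with
  | nil => intro st r; simp [pvFB1, pvStk, pvFA]
  | cons ic t ih =>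
    intro st r
    by_cases h1 : ic.2 = '('
    · have hc : ((st.length : Nat) : Int) + 1 = ((st ++ [ic.1]).length : Nat) := by
        simp
      simp only [pvFB1, pvFA, pvStk, h1, if_pos, hc, ih]
    · by_cases h2 : ic.2 = ')'
      · by_cases h3 : st = []
        · subst h3
          have h := ih [] (PySem.Set.add r ic.1)
          simp only [List.length_nil, Nat.cast_zero] at h
          simp [pvFB1, pvFA, pvStk, h1, h2, h]
        · have hpos : 0 < st.length := List.length_pos_iff.mpr h3
          have hne : ((st.length : Nat) : Int) ≠ 0 := by omega
          have hdl : st.dropLast.length = st.length - 1 := by simp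
          have hl : ((st.length : Nat) : Int) - 1 = ((st.dropLast.length : Nat) : Int) := by
            omega
          simp only [pvFB1, pvFA, pvStk, h1, h2, h3, hne, hl, if_neg, ite_false, ite_true,
            if_false, ih]
          simp [h1, h2, h3, hne, ih]
      · simp [pvFB1, pvFA, pvStk, h1, h2, ih]

-- the leftover stack is strictly increasing
theorem pvStk_pairwise (l : List Char) : ∀ (k : Int) (st : List Int),
    st.Pairwise (· < ·) → (∀ x ∈ st, x < k) →
    (pvStk (PySem.List.enumerate l k) st).Pairwise (· < ·) := by
  induction l with
  | nil => intro k st hp hb; simpa [PySem.List.enumerate, pvStk] using hp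
  | cons c t ih =>
    intro k st hp hb
    rw [PySem.List.enumerate_cons]
    by_cases h1 : c = '('
    · have e1 : pvStk ((k, c) :: PySem.List.enumerate t (k + 1)) st
          = pvStk (PySem.List.enumerate t (k + 1)) (st ++ [k]) := by simp [pvStk, h1]
      rw [e1]
      apply ih (k + 1) (st ++ [k])
      · refine List.pairwise_append.mpr ⟨hp, by simp, ?_⟩
        intro a ha b hb'
        simp only [List.mem_singleton] at hb'
        subst hb'
        exact hb a ha
      · intro x hx
        rcases List.mem_append.mp hx with h | h
        · exact lt_trans (hb x h) (by omega)
        · simp only [List.mem_singleton] at h; omega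
    · by_cases h2 : c = ')'
      · by_cases h3 : st = []
        · have e1 : pvStk ((k, c) :: PySem.List.enumerate t (k + 1)) st
              = pvStk (PySem.List.enumerate t (k + 1)) st := by simp [pvStk, h1, h2, h3]
          rw [e1]
          exact ih (k + 1) st hp (fun x hx => lt_trans (hb x hx) (by omega))
        · have e1 : pvStk ((k, c) :: PySem.List.enumerate t (k + 1)) st
              = pvStk (PySem.List.enumerate t (k + 1)) st.dropLast := by
            simp [pvStk, h1, h2, h3]
          rw [e1]
          apply ih (k + 1) st.dropLast
          · exact hp.sublist (List.dropLast_sublist st)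
          · intro x hx
            exact lt_trans (hb x ((List.dropLast_sublist st).subset hx)) (by omega)
      · have e1 : pvStk ((k, c) :: PySem.List.enumerate t (k + 1)) st
            = pvStk (PySem.List.enumerate t (k + 1)) st := by simp [pvStk, h1, h2]
        rw [e1]
        exact ih (k + 1) st hp (fun x hx => lt_trans (hb x hx) (by omega))

-- ===== VERDICT (by name: the statement is the Claim_ definition above) =====
theorem get_indexes_to_remove_spec : Claim_equal_get_indexes_to_remove := by
  intro s _
  unfold Spec_get_indexes_to_remove get_indexes_to_remove get_indexes_to_remove_alt
  simp only [foldlA_eq, foldlB1_eq, foldlB2_eq]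
  have hb1 := pvFB1_eq (PySem.List.enumerate s.toList 0) [] PySem.Set.empty
  simp only [List.length_nil, Nat.cast_zero] at hb1
  rw [hb1, pvBR_eq, fst_pvFA]
  simp only [List.reverse_reverse]
  have hnd : (pvStk (PySem.List.enumerate s.toList 0) []).Nodup := by
    have hpair := pvStk_pairwise s.toList 0 [] (by simp) (by simp)
    exact hpair.imp (fun h => ne_of_lt h)
  rw [PySem.Set.ofList_eq_self_of_nodup _ hnd]
  rfl
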